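-- pv_equiv track=rewrite | github.com/CofelyGTC/nyx_containers | sources/biac_import_kpi502.py | compute_previous_months
-- ===== SOURCE A (Python) =====
-- def compute_previous_months(month,year,number,skip=0):
--     ret=[]
--
--     while(number>0):
--         if skip<=0:
--             ret.append("%d-%s" %(year,str(month).zfill(2)))
--         month-=1
--         if month==0:
--             month=12
--             year-=1
--         skip-=1
--         number-=1
--     return ret
-- ===== SOURCE B (Python) =====
-- def compute_previous_months(month, year, number, skip=0):
--     return ["%d-%02d" % (year + (month - 1 - i) // 12, (month - 1 - i) % 12 + 1)
--             for i in range(max(skip, 0), number)]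
-- ===== Notes on version B (the rewrite author's own statement) =====
-- stated objective: alternative
-- what changed: A's stateful while loop (mutable month/year/skip with a wrap-at-zero conditional) is replaced by a stateless list comprehension over range(max(skip,0), number) that computes each year-month label directly from its index in closed form with floor-divmod by 12.
-- intended difference: On inputs that emit output (max(skip,0) < number) whose month at the first emitted index lies outside 1..12 (month <= 0, or month - max(skip,0) >= 13), A emits un-normalized labels such as '2020-13' or '2020-00' because it only wraps when its counter hits exactly 0, while B wraps every month into 1..12 (e.g. '2021-01'), which is the intended year-month label. — e.g. on compute_previous_months(13, 2020, 1, 0): A returns ["2020-13"], B returns ["2021-01"]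
import Mathlib
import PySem

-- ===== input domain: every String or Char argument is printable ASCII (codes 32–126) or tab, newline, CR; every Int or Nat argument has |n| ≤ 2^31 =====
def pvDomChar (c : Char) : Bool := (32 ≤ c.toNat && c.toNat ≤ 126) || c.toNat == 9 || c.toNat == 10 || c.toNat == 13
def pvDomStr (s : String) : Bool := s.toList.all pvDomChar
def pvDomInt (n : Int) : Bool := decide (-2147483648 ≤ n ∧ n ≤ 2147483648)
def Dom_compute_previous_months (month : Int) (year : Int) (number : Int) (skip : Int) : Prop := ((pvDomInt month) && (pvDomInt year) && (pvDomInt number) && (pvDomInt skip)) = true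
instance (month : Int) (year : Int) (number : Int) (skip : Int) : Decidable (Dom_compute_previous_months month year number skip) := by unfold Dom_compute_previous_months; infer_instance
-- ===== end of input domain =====

-- B replaces A's stateful while loop by a stateless comprehension computing each
-- label in closed form by divmod; where A emits un-normalized month labels
-- (month outside 1..12 at the first emitted index) B wraps into 1..12 — see D_.

-- ===== PORT A =====
-- shared formatting: A's "%d-%s" % (year, str(month).zfill(2)); B's "%d-%02d"
-- agrees with it on the 1..12 months B produces
def pvFmt (y m : Int) : String :=
  PySem.Int.toStr y ++ "-" ++ PySem.Str.zfill (PySem.Int.toStr m) 2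

-- the while loop: number > 0 and number -= 1 each pass ⇒ fuel = number.toNat
def pvLoopA (month year skip : Int) (fuel : Nat) (ret : List String) : List String :=
  match fuel with
  | 0 => ret
  | Nat.succ n =>
    let ret' := if skip ≤ 0 then ret ++ [pvFmt year month] else ret
    if month - 1 = 0 then pvLoopA 12 (year - 1) (skip - 1) n ret'
    else pvLoopA (month - 1) year (skip - 1) n ret'

def compute_previous_months (month : Int) (year : Int) (number : Int) (skip : Int) : List String :=
  pvLoopA month year skip number.toNat []

-- ===== PORT B =====
def compute_previous_months_alt (month : Int) (year : Int) (number : Int) (skip : Int) : List String :=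
  (PySem.List.pyRange (max skip 0) number 1).map (fun i =>
    pvFmt (year + PySem.Int.floordiv (month - 1 - i) 12)
          (PySem.Int.mod (month - 1 - i) 12 + 1))

-- ===== PRECONDITION & SPEC =====
-- On inputs that emit output (max(skip,0) < number) whose month at the first emitted
-- index lies outside 1..12 (month ≤ 0, or month - max(skip,0) ≥ 13), A emits
-- un-normalized labels such as "2020-13" or "2020-00" because it only wraps when its
-- counter hits exactly 0, while B wraps every month into 1..12 (e.g. "2021-01"),
-- which is the intended year-month label.
def D_compute_previous_months (month : Int) (year : Int) (number : Int) (skip : Int) : Prop :=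
  max skip 0 < number ∧ (month ≤ 0 ∨ 13 ≤ month - max skip 0)
instance (month : Int) (year : Int) (number : Int) (skip : Int) : Decidable (D_compute_previous_months month year number skip) := by unfold D_compute_previous_months; infer_instance

def Spec_compute_previous_months (month : Int) (year : Int) (number : Int) (skip : Int) (out : List String) : Prop := ¬ D_compute_previous_months month year number skip → out = compute_previous_months_alt month year number skip
instance (month : Int) (year : Int) (number : Int) (skip : Int) (out : List String) : Decidable (Spec_compute_previous_months month year number skip out) := by unfold Spec_compute_previous_months; infer_instance

def pvDiffWitness_compute_previous_months : Int × Int × Int × Int := (13, 2020, 1, 0)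
def pvDiffWitnessOut_compute_previous_months : (List String) × (List String) := (["2020-13"], ["2021-01"])

-- ===== CLAIM =====
def Claim_unchanged_compute_previous_months : Prop := ∀ (month : Int) (year : Int) (number : Int) (skip : Int), Dom_compute_previous_months month year number skip → Spec_compute_previous_months month year number skip (compute_previous_months month year number skip)
def Claim_changed_compute_previous_months : Prop := Dom_compute_previous_months (pvDiffWitness_compute_previous_months.1) (pvDiffWitness_compute_previous_months.2.1) (pvDiffWitness_compute_previous_months.2.2.1) (pvDiffWitness_compute_previous_months.2.2.2) ∧ D_compute_previous_months (pvDiffWitness_compute_previous_months.1) (pvDiffWitness_compute_previous_months.2.1) (pvDiffWitness_compute_previous_months.2.2.1) (pvDiffWitness_compute_previous_months.2.2.2) ∧ compute_previous_months (pvDiffWitness_compute_previous_months.1) (pvDiffWitness_compute_previous_months.2.1) (pvDiffWitness_compute_previous_months.2.2.1) (pvDiffWitness_compute_previous_months.2.2.2) = pvDiffWitnessOut_compute_previous_months.1 ∧ compute_previous_months_alt (pvDiffWitness_compute_previous_months.1) (pvDiffWitness_compute_previous_months.2.1) (pvDiffWitness_compute_previous_months.2.2.1) (pvDiffWitness_compute_previous_months.2.2.2)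 = pvDiffWitnessOut_compute_previous_months.2 ∧ pvDiffWitnessOut_compute_previous_months.1 ≠ pvDiffWitnessOut_compute_previous_months.2

-- ===== LEMMAS AND PROOFS =====

-- closed form for A's trajectory: the (year, month) state after i backward steps
def pvStateA (month year i : Int) : Int × Int :=
  if month ≤ 0 ∨ 13 ≤ month - i then (year, month - i)
  else (year + PySem.Int.floordiv (month - 1 - i) 12, PySem.Int.mod (month - 1 - i) 12 + 1)

lemma pvStateA_zero (month year : Int) : pvStateA month year 0 = (year, month) := by
  unfold pvStateA
  by_cases h : month ≤ 0 ∨ 13 ≤ month - 0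
  · rw [if_pos h]; simp
  · rw [if_neg h]
    simp only [not_or, not_le] at h
    obtain ⟨h1, h2⟩ := h
    have hd : PySem.Int.floordiv (month - 1 - 0) 12 = 0 :=
      (PySem.Int.floordiv_eq_iff_of_pos (by omega)).2 (by omega)
    have hm := PySem.Int.floordiv_mul_add_mod (month - 1 - 0) 12
    rw [hd] at hm
    refine Prod.ext ?_ ?_ <;> simp <;> omega

-- one backward step of A's loop advances the closed-form index
lemma pvStateA_step (month year i : Int) (hi : 0 ≤ i) :
    pvStateA month year (i + 1) =
      if (pvStateA month year i).2 - 1 = 0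
      then ((pvStateA month year i).1 - 1, 12)
      else ((pvStateA month year i).1, (pvStateA month year i).2 - 1) := by
  unfold pvStateA
  by_cases h : month ≤ 0 ∨ 13 ≤ month - i
  · rcases h with h | h
    · rw [if_pos (Or.inl h), if_pos (Or.inl h)]
      have : ¬ (month - i - 1 = 0) := by omega
      simp [this]
      omega
    · rw [if_pos (Or.inr h)]
      by_cases h13 : 13 ≤ month - (i + 1)
      · rw [if_pos (Or.inr h13)]
        have : ¬ (month - i - 1 = 0) := by omega
        simp [this]
        omega
      · have he : month - i = 13 := by omega
        rw [if_neg (by simp only [not_or, not_le]; omega : ¬(month ≤ 0 ∨ 13 ≤ month - (i + 1)))]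
        have hd : PySem.Int.floordiv (month - 1 - (i + 1)) 12 = 0 :=
          (PySem.Int.floordiv_eq_iff_of_pos (by omega)).2 (by omega)
        have hm := PySem.Int.floordiv_mul_add_mod (month - 1 - (i + 1)) 12
        rw [hd] at hm
        have hne : ¬ (month - i - 1 = 0) := by omega
        simp [hne]
        omega
  · simp only [not_or, not_le] at h
    obtain ⟨h1, h2⟩ := h
    rw [if_neg (by simp only [not_or, not_le]; omega : ¬(month ≤ 0 ∨ 13 ≤ month - i)),
        if_neg (by simp only [not_or, not_le]; omega : ¬(month ≤ 0 ∨ 13 ≤ month - (i + 1)))]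
    have e1 := PySem.Int.floordiv_mul_add_mod (month - 1 - i) 12
    have e2 := PySem.Int.floordiv_mul_add_mod (month - 1 - (i + 1)) 12
    have r1a := PySem.Int.mod_nonneg (month - 1 - i) (by omega : (0:Int) < 12)
    have r1b := PySem.Int.mod_lt (month - 1 - i) (by omega : (0:Int) < 12)
    have r2a := PySem.Int.mod_nonneg (month - 1 - (i + 1)) (by omega : (0:Int) < 12)
    have r2b := PySem.Int.mod_lt (month - 1 - (i + 1)) (by omega : (0:Int) < 12)
    by_cases hr : PySem.Int.mod (month - 1 - i) 12 + 1 - 1 = 0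
    · rw [if_pos hr]
      refine Prod.ext ?_ ?_ <;> simp <;> omega
    · rw [if_neg hr]
      refine Prod.ext ?_ ?_ <;> simp <;> omega

-- the loop from the state after i steps emits exactly indices i…i+fuel-1 with skip ≤ index
lemma pvLoopA_eq (n : Nat) : ∀ (month year skip i : Int) (ret : List String), 0 ≤ i →
    pvLoopA (pvStateA month year i).2 (pvStateA month year i).1 (skip - i) n ret =
      ret ++ ((PySem.List.pyRange i (i + n) 1).filter (fun j => decide (skip ≤ j))).map
        (fun j => pvFmt (pvStateA month year j).1 (pvStateA month year j).2) := by
  induction n with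
  | zero =>
    intro month year skip i ret hi
    rw [PySem.List.pyRange_one_eq_nil (by omega)]
    simp [pvLoopA]
  | succ n ih =>
    intro month year skip i ret hi
    rw [show (i + ((n + 1 : Nat) : Int)) = i + ((n : Int) + 1) by push_cast; ring,
       PySem.List.pyRange_one_cons (by omega : i < i + ((n : Int) + 1))]
    have hstep := pvStateA_step month year i hi
    have harith : i + ((n : Int) + 1) = (i + 1) + (n : Nat) := by ring
    have hskip' : skip - (i + 1) = skip - i - 1 := by ring
    by_cases hc : skip ≤ i
    · rw [List.filter_cons_of_pos (by simpa using hc)]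
      simp only [pvLoopA, if_pos (show skip - i ≤ 0 by omega)]
      by_cases hw : (pvStateA month year i).2 - 1 = 0
      · rw [if_pos hw]
        have hIH := ih month year skip (i + 1)
          (ret ++ [pvFmt (pvStateA month year i).1 (pvStateA month year i).2]) (by omega)
        rw [hstep, if_pos hw, hskip'] at hIH
        simp only at hIH
        rw [harith, hIH]
        simp
      · rw [if_neg hw]
        have hIH := ih month year skip (i + 1)
          (ret ++ [pvFmt (pvStateA month year i).1 (pvStateA month year i).2]) (by omega)
        rw [hstep, if_neg hw, hskip'] at hIH
        simp only at hIH
        rw [harith, hIH]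
        simp
    · rw [List.filter_cons_of_neg (by simpa using hc)]
      simp only [pvLoopA, if_neg (show ¬ skip - i ≤ 0 by omega)]
      by_cases hw : (pvStateA month year i).2 - 1 = 0
      · rw [if_pos hw]
        have hIH := ih month year skip (i + 1) ret (by omega)
        rw [hstep, if_pos hw, hskip'] at hIH
        simp only at hIH
        rw [harith, hIH]
      · rw [if_neg hw]
        have hIH := ih month year skip (i + 1) ret (by omega)
        rw [hstep, if_neg hw, hskip'] at hIH
        simp only at hIH
        rw [harith, hIH]

-- filtering range(a, b) by s ≤ j is range(max(s,a), b)
lemma pvFilter_range_aux (s : Int) : ∀ (k : Nat) (a b : Int), (b - a).toNat = k →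
    (PySem.List.pyRange a b 1).filter (fun j => decide (s ≤ j)) =
      PySem.List.pyRange (max s a) b 1 := by
  intro k
  induction k with
  | zero =>
    intro a b hk
    rw [PySem.List.pyRange_one_eq_nil (by omega : b ≤ a),
        PySem.List.pyRange_one_eq_nil (by omega : b ≤ max s a)]
    rfl
  | succ k ih =>
    intro a b hk
    have hab : a < b := by omega
    rw [PySem.List.pyRange_one_cons hab]
    by_cases hs : s ≤ a
    · rw [List.filter_cons_of_pos (by simpa using hs),
          ih (a + 1) b (by omega),
          show max s (a + 1) = a + 1 by omega,
          show max s a = a by omega,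
          PySem.List.pyRange_one_cons hab]
    · rw [List.filter_cons_of_neg (by simpa using hs),
          ih (a + 1) b (by omega),
          show max s (a + 1) = max s a by omega]

-- ===== VERDICT =====
theorem compute_previous_months_spec : Claim_unchanged_compute_previous_months := by
  intro month year number skip _
  unfold Spec_compute_previous_months
  intro hD
  unfold compute_previous_months compute_previous_months_alt
  have h := pvLoopA_eq number.toNat month year skip 0 [] le_rfl
  rw [pvStateA_zero] at h
  simp only [sub_zero, zero_add, List.nil_append] at h
  rw [h]
  rw [show ((number.toNat : Int)) = max number 0 by omega]
  have hsplit : PySem.List.pyRange 0 (max number 0) 1 = PySem.List.pyRange 0 number 1 := by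
    by_cases hn : 0 ≤ number
    · rw [show max number 0 = number by omega]
    · rw [PySem.List.pyRange_one_eq_nil (by omega : max number 0 ≤ 0),
          PySem.List.pyRange_one_eq_nil (by omega : number ≤ 0)]
  rw [hsplit, pvFilter_range_aux skip (number - 0).toNat 0 number rfl,
      show max skip 0 = max skip 0 from rfl]
  apply List.map_congr_left
  intro i hi
  rw [PySem.List.mem_pyRange_one] at hi
  unfold D_compute_previous_months at hD
  push Not at hD
  have h2 := hD (by omega : max skip 0 < number)
  unfold pvStateA
  rw [if_neg (by omega : ¬(month ≤ 0 ∨ 13 ≤ month - i))]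

theorem compute_previous_months_changed : Claim_changed_compute_previous_months := by
  unfold Claim_changed_compute_previous_months; decide
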